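-- pv_equiv track=rewrite | github.com/iuriimqa/DI-Bootcamp | Bootcamp- lesson- cods/D4/exercises.py | multiply_add
-- ===== SOURCE A (Python) =====
-- def multiply_add(num: int, limit: int) -> int:
--     base = '1'
--     res = 0
--
--     for i in range(1, limit + 1):
--         multiplicator = base * i # '11'
--         multiplicator = int(multiplicator) # 11
--         res += num * multiplicator
--
--     return res
-- ===== SOURCE B (Python) =====
-- def multiply_add(num: int, limit: int) -> int:
--     # closed form: sum of repunits 1..limit = (10**(limit+1) - 10 - 9*limit) / 81
--     if limit <= 0:
--         return 0
--     return num * ((10 ** (limit + 1) - 10 - 9 * limit) // 81)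
-- ===== Notes on version B (the rewrite author's own statement) =====
-- stated objective: faster
-- what changed: Replaces the loop that builds and parses the repunit string '1'*i for every i with the closed-form geometric-series sum num*((10^(limit+1)-10-9*limit)/81).
import Mathlib
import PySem

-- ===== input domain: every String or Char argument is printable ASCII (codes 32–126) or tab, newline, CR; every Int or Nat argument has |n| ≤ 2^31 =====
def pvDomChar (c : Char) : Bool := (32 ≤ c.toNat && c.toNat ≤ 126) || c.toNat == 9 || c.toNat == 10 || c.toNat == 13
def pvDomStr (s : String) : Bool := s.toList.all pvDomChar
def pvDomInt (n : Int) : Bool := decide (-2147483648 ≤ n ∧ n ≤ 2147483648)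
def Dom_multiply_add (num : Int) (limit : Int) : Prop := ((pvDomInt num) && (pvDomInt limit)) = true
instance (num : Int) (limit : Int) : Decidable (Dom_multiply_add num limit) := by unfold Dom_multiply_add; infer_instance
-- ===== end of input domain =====

-- B replaces A's build-and-parse-a-repunit-string loop by the closed-form geometric-series sum (measured asymptotically faster).

-- ===== PORT A =====
-- hand port of int(s), exact for nonempty strings of ASCII digits — which '1'*i, i ≥ 1, always is
-- (no sign, no whitespace, no underscores): the value is the left-to-right digit fold
def pyIntOfDigits (cs : List Char) : Int :=
  cs.foldl (fun acc c => 10 * acc + ((c.toNat : Int) - 48)) 0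

def multiply_add (num : Int) (limit : Int) : Int :=
  -- base = '1'; res = 0; for i in range(1, limit+1): multiplicator = int(base * i); res += num * multiplicator
  (PySem.List.pyRange 1 (limit + 1) 1).foldl
    (fun res i => res + num * pyIntOfDigits (List.replicate i.toNat '1')) 0

-- ===== PORT B =====
def multiply_add_alt (num : Int) (limit : Int) : Int :=
  if limit ≤ 0 then 0
  -- 10 ** (limit + 1): in this branch limit + 1 ≥ 2, so the .toNat exponent is exact
  else num * PySem.Int.floordiv ((10 : Int) ^ (limit + 1).toNat - 10 - 9 * limit) 81

-- ===== PRECONDITION & SPEC =====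
def Spec_multiply_add (num : Int) (limit : Int) (out : Int) : Prop := out = multiply_add_alt num limit
instance (num : Int) (limit : Int) (out : Int) : Decidable (Spec_multiply_add num limit out) := by unfold Spec_multiply_add; infer_instance

-- ===== CLAIM (what is proved, stated in full; the proofs are below) =====
def Claim_equal_multiply_add : Prop := ∀ (num : Int) (limit : Int), Dom_multiply_add num limit → Spec_multiply_add num limit (multiply_add num limit)

-- ===== LEMMAS AND PROOFS =====

-- the repunit with n ones, in the recursive form the digit fold produces
def repu : Nat → Int
  | 0 => 0
  | n + 1 => 10 * repu n + 1

-- cumulative sum of repunits 1..n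
def repuSum : Nat → Int
  | 0 => 0
  | n + 1 => repuSum n + repu (n + 1)

theorem nine_repu (n : Nat) : 9 * repu n = 10 ^ n - 1 := by
  induction n with
  | zero => simp [repu]
  | succ n ih =>
    simp only [repu]
    rw [pow_succ]
    linear_combination 10 * ih

theorem eightyone_repuSum (n : Nat) :
    81 * repuSum n = 10 ^ (n + 1) - 10 - 9 * (n : Int) := by
  induction n with
  | zero => simp [repuSum]
  | succ n ih =>
    have h9 := nine_repu (n + 1)
    simp only [repuSum]
    push_cast
    rw [show n + 1 + 1 = (n + 1) + 1 from rfl, pow_succ (10 : Int) (n + 1)]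
    linear_combination ih + 9 * h9

theorem foldl_ones (n : Nat) (acc : Int) :
    (List.replicate n '1').foldl (fun acc c => 10 * acc + ((c.toNat : Int) - 48)) acc
      = 10 ^ n * acc + repu n := by
  induction n generalizing acc with
  | zero => simp [repu]
  | succ n ih =>
    rw [List.replicate_succ, List.foldl_cons, ih]
    have h9 := nine_repu n
    have hc : ((('1').toNat : Int) - 48) = 1 := by decide
    simp only [repu, hc]
    rw [pow_succ]
    linear_combination -h9

theorem pyIntOfDigits_ones (n : Nat) :
    pyIntOfDigits (List.replicate n '1') = repu n := by
  unfold pyIntOfDigits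
  rw [foldl_ones]
  ring

theorem loop_eq (num : Int) (n : Nat) (acc : Int) :
    (PySem.List.pyRange 1 ((n : Int) + 1) 1).foldl
      (fun res i => res + num * pyIntOfDigits (List.replicate i.toNat '1')) acc
      = acc + num * repuSum n := by
  induction n generalizing acc with
  | zero =>
    simp only [Nat.cast_zero, zero_add]
    rw [PySem.List.pyRange_one_eq_nil (le_refl 1)]
    simp [repuSum]
  | succ n ih =>
    have hb : ((↑(n + 1) : Int) + 1) = ((n : Int) + 1) + 1 := by push_cast; ring
    rw [hb, PySem.List.pyRange_one_succ_right (by omega),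
      List.foldl_append, ih]
    simp only [List.foldl_cons, List.foldl_nil]
    have ht : ((n : Int) + 1).toNat = n + 1 := by omega
    rw [ht, pyIntOfDigits_ones]
    simp only [repuSum]
    ring

-- ===== VERDICT (by name: the statement is the Claim_ definition above) =====
theorem multiply_add_spec : Claim_equal_multiply_add := by
  intro num limit _
  unfold Spec_multiply_add multiply_add multiply_add_alt
  by_cases h : limit ≤ 0
  · rw [if_pos h, PySem.List.pyRange_one_eq_nil (by omega)]
    simp
  · rw [if_neg h]
    obtain ⟨n, rfl⟩ : ∃ n : Nat, limit = (n : Int) :=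
      ⟨limit.toNat, (Int.toNat_of_nonneg (by omega)).symm⟩
    rw [loop_eq]
    have ht : ((n : Int) + 1).toNat = n + 1 := by omega
    rw [ht, show (10 : Int) ^ (n + 1) - 10 - 9 * (n : Int) = 81 * repuSum n from
        (eightyone_repuSum n).symm,
      PySem.Int.floordiv_eq_ediv_of_pos (by norm_num),
      Int.mul_ediv_cancel_left _ (by norm_num)]
    ring
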